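-- pv_equiv track=rewrite | github.com/Xerxes-2/COMP9021 | quiz_7.py | centrifuge
-- ===== SOURCE A (Python) =====
-- from math import sqrt
--
-- def centrifuge(n, k):
--     if k == 0 or n == k:
--         return True
--     r = n - k
--     prime_factor = []
--     for i in range(2, int(sqrt(n)) + 1):
--         if n % i == 0:
--             while n % i == 0:
--                 n //= i
--             prime_factor.append(i)
--     if n != 1 and n != r + k:
--         prime_factor.append(n)
--     if not prime_factor:
--         return False
--     return check_sum(prime_factor, k) and check_sum(prime_factor, r)
--
-- def check_sum(factors, goal):
--     if goal == 0:
--         return True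
--     if not factors:
--         return False
--     new_factors = factors[:-1]
--     for j in range(0, goal + 1, factors[-1]):
--         if check_sum(new_factors, goal - j):
--             return True
--     else:
--         return False
-- ===== SOURCE B (Python) =====
-- from math import sqrt
--
-- def centrifuge(n, k):
--     if k == 0 or k == n:
--         return True
--     if k < 0 or k > n:
--         return False
--     r = n - k
--     m = n
--     factors = []
--     for i in range(2, int(sqrt(n)) + 1):
--         if m % i == 0:
--             while m % i == 0:
--                 m //= i
--             factors.append(i)
--     if m > 1:
--         factors.append(m)
--     goal = max(k, r)
--     dp = bytearray(goal + 1)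
--     dp[0] = 1
--     for p in factors:
--         for j in range(p, goal + 1):
--             if dp[j - p]:
--                 dp[j] = 1
--     return bool(dp[k]) and bool(dp[r])
-- ===== Notes on version B (the rewrite author's own statement) =====
-- stated objective: alternative
-- what changed: B replaces A's exponential recursive check_sum (branching over all multiples of each factor) with a single bottom-up boolean reachability table (unbounded coin-change DP) over 0..max(k, n-k), read off for both k and n-k; it also returns False up front when k is outside [0, n].
import Mathlib
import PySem

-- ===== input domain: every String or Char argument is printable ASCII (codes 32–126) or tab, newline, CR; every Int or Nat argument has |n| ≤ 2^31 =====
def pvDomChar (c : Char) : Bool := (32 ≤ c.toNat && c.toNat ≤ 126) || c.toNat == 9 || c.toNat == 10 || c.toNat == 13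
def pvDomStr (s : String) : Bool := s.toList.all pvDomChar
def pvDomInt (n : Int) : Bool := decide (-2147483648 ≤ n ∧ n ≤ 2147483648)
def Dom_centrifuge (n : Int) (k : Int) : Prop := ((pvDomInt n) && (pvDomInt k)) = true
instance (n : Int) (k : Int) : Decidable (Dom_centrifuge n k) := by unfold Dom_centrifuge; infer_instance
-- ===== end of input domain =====

-- B replaces A's recursive check_sum search with one bottom-up boolean reachability
-- table (coin-change DP) over 0..max(k, n-k); equivalence of return values is proved below.

-- ===== PORT A =====

-- 'while n % i == 0: n //= i' — fuel-bounded recursion; fuel m.toNat always suffices on the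
-- inputs the surrounding loop reaches (0 < m, 2 ≤ i), where the Python loop terminates.
def pvDivideOut (i : Int) : Nat → Int → Int
  | 0, m => m
  | f + 1, m =>
    if PySem.Int.mod m i = 0 then pvDivideOut i f (PySem.Int.floordiv m i) else m

-- loop body of 'for i in range(2, int(sqrt(n)) + 1)' shared verbatim by Source A and Source B
def pvFactorStep (st : Int × List Int) (i : Int) : Int × List Int :=
  if PySem.Int.mod st.1 i = 0 then (pvDivideOut i st.1.toNat st.1, st.2 ++ [i]) else st

def checkSum (factors : List Int) (goal : Int) : Bool :=
  if goal = 0 then true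
  else if hne : factors = [] then false   -- 'if not factors: return False'
  else                                    -- factors.getLast = factors[-1]; dropLast = factors[:-1]
    (PySem.List.pyRange 0 (goal + 1) (factors.getLast hne)).any
      (fun j => checkSum factors.dropLast (goal - j))
termination_by factors.length
decreasing_by
  have := List.length_pos_iff.mpr hne
  simp [List.length_dropLast]; omega

-- int(sqrt(n)) = Nat.sqrt for 0 ≤ n ≤ 2^31 (float sqrt is exact enough there);
-- for n < 0 Python raises ValueError — excluded by Pre_.
def centrifuge (n : Int) (k : Int) : Bool :=
  if k = 0 ∨ n = k then true
  else
    let r := n - k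
    let st := (PySem.List.pyRange 2 ((n.toNat.sqrt : Int) + 1) 1).foldl pvFactorStep (n, [])
    let pf := if st.1 ≠ 1 ∧ st.1 ≠ r + k then st.2 ++ [st.1] else st.2
    if pf = [] then false
    else checkSum pf k && checkSum pf r

-- ===== PORT B =====

-- the DP loops 'for p in factors: for j in range(p, goal+1): …'; all indices are ≥ 0 there,
-- so dp[j-p] / dp[j] = 1 are ported with getD/set at the .toNat index (exact on this loop).
def altDP (goal : Int) (factors : List Int) : List Bool :=
  factors.foldl
    (fun dp p =>
      (PySem.List.pyRange p (goal + 1) 1).foldl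
        (fun dp j => if dp.getD (j - p).toNat false then dp.set j.toNat true else dp) dp)
    (true :: List.replicate goal.toNat false)

def centrifuge_alt (n : Int) (k : Int) : Bool :=
  if k = 0 ∨ k = n then true
  else if k < 0 ∨ n < k then false
  else
    let r := n - k
    let st := (PySem.List.pyRange 2 ((n.toNat.sqrt : Int) + 1) 1).foldl pvFactorStep (n, [])
    let pf := if 1 < st.1 then st.2 ++ [st.1] else st.2
    let dp := altDP (max k r) pf
    dp.getD k.toNat false && dp.getD r.toNat false

-- ===== PRECONDITION & SPEC =====
-- A raises ValueError (math domain error of sqrt) exactly when n < 0 and neither early return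
-- fires; Pre_ excludes exactly those inputs.
def Pre_centrifuge (n : Int) (k : Int) : Prop := k = 0 ∨ k = n ∨ 0 ≤ n
instance (n : Int) (k : Int) : Decidable (Pre_centrifuge n k) := by unfold Pre_centrifuge; infer_instance
def pvWitness_centrifuge : Int × Int := (12, 7)

def Spec_centrifuge (n : Int) (k : Int) (out : Bool) : Prop := out = centrifuge_alt n k
instance (n : Int) (k : Int) (out : Bool) : Decidable (Spec_centrifuge n k out) := by unfold Spec_centrifuge; infer_instance

-- ===== CLAIM (what is proved, stated in full; the proofs are below) =====
def Claim_equal_centrifuge : Prop := ∀ (n : Int) (k : Int), Dom_centrifuge n k → Pre_centrifuge n k → Spec_centrifuge n k (centrifuge n k)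

-- ===== LEMMAS AND PROOFS =====

-- g is a sum of (finitely many, with repetition) elements of P
inductive Reach : List Int → Int → Prop
  | zero (P : List Int) : Reach P 0
  | step {P : List Int} {g p : Int} : p ∈ P → Reach P g → Reach P (g + p)

theorem reach_nonneg {P : List Int} {g : Int} (hP : ∀ p ∈ P, 0 ≤ p) (h : Reach P g) : 0 ≤ g := by
  induction h with
  | zero => omega
  | step hp _ ih => have := hP _ hp; omega

theorem reach_nil {g : Int} : Reach [] g ↔ g = 0 := by
  constructor
  · intro h; cases h with
    | zero => rfl
    | step hp _ => simp at hp
  · rintro rfl; exact Reach.zero []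

theorem reach_mono {P Q : List Int} {g : Int} (hPQ : ∀ p ∈ P, p ∈ Q) (h : Reach P g) :
    Reach Q g := by
  induction h with
  | zero => exact Reach.zero Q
  | step hp _ ih => exact Reach.step (hPQ _ hp) ih

theorem reach_add_mul {P : List Int} {g q : Int} (hq : q ∈ P) (t : Nat) (h : Reach P g) :
    Reach P (g + t * q) := by
  induction t with
  | zero => simpa using h
  | succ t ih =>
      have := Reach.step hq ih
      have e : g + (t : Int) * q + q = g + ((t + 1 : Nat) : Int) * q := by push_cast; ring
      exact e ▸ this

theorem reach_append_iff {P : List Int} {q g : Int} :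
    Reach (P ++ [q]) g ↔ ∃ t : Nat, Reach P (g - t * q) := by
  constructor
  · intro h
    induction h with
    | zero => exact ⟨0, by simpa using Reach.zero P⟩
    | @step g' p hp _ ih =>
        obtain ⟨t, ht⟩ := ih
        rcases List.mem_append.1 hp with hp | hp
        · refine ⟨t, ?_⟩
          have := Reach.step hp ht
          have e : g' - (t : Int) * q + p = g' + p - (t : Int) * q := by ring
          exact e ▸ this
        · simp at hp
          refine ⟨t + 1, ?_⟩
          have e : g' - (t : Int) * q = g' + p - ((t + 1 : Nat) : Int) * q := by
            rw [hp]; push_cast; ring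
          exact e ▸ ht
  · rintro ⟨t, ht⟩
    have h1 : Reach (P ++ [q]) (g - t * q) := reach_mono (by intro p hp; simp [hp]) ht
    have h2 := reach_add_mul (P := P ++ [q]) (q := q) (by simp) t h1
    have e : g - (t : Int) * q + (t : Int) * q = g := by ring
    exact e ▸ h2

theorem reach_singleton {q g : Int} : Reach [q] g ↔ ∃ t : Nat, g = t * q := by
  have := reach_append_iff (P := []) (q := q) (g := g)
  simp only [List.nil_append] at this
  rw [this]
  constructor
  · rintro ⟨t, ht⟩; exact ⟨t, by have := reach_nil.1 ht; omega⟩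
  · rintro ⟨t, rfl⟩; exact ⟨t, by simpa using Reach.zero []⟩

-- ---- A's check_sum computes Reach ----
theorem checkSum_iff (P : List Int) : ∀ g : Int, (∀ p ∈ P, 2 ≤ p) →
    (checkSum P g = true ↔ Reach P g) := by
  induction P using List.reverseRecOn with
  | nil =>
      intro g _
      rw [checkSum]
      by_cases hg : g = 0 <;> simp [hg, reach_nil]
  | append_singleton Q q ih =>
      intro g hP
      have hq : 2 ≤ q := hP q (by simp)
      have hQ : ∀ p ∈ Q, 2 ≤ p := fun p hp => hP p (by simp [hp])
      have hQ0 : ∀ p ∈ Q, (0:Int) ≤ p := fun p hp => by have := hQ p hp; omega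
      by_cases hg : g = 0
      · subst hg
        rw [checkSum]
        simpa using Reach.zero _
      · rw [checkSum, if_neg hg, dif_neg (by simp : ¬ (Q ++ [q] = []))]
        simp only [List.getLast_concat, List.dropLast_concat]
        rw [List.any_eq_true, reach_append_iff]
        constructor
        · rintro ⟨j, hj, hcs⟩
          rw [PySem.List.mem_pyRange_iff_of_pos (by omega)] at hj
          obtain ⟨hj0, hjlt, hdvd⟩ := hj
          obtain ⟨c, rfl⟩ := (by simpa using hdvd : q ∣ j)
          have hc0 : 0 ≤ c := by nlinarith
          refine ⟨c.toNat, ?_⟩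
          rw [Int.toNat_of_nonneg hc0]
          have := (ih (g - q * c) hQ).1 hcs
          have e : g - q * c = g - c * q := by ring
          rw [e] at this; exact this
        · rintro ⟨t, ht⟩
          have hnn : 0 ≤ g - (t : Int) * q := reach_nonneg hQ0 ht
          refine ⟨(t : Int) * q, ?_, ?_⟩
          · rw [PySem.List.mem_pyRange_iff_of_pos (by omega)]
            refine ⟨by positivity, by omega, by simp⟩
          · exact (ih (g - (t : Int) * q) hQ).2 ht

-- ---- B's DP table computes Reach ----
theorem dp_inner (G p : Int) (hp : 2 ≤ p) (C : List Int) :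
    ∀ (c : Nat) (a : Int), p ≤ a → G + 1 - a ≤ (c : Int) → ∀ (dp : List Bool),
      dp.length = G.toNat + 1 →
      (∀ j : Nat, (j : Int) < a → j ≤ G.toNat →
        (dp.getD j false = true ↔ ∃ t : Nat, Reach C ((j : Int) - t * p))) →
      (∀ j : Nat, a ≤ (j : Int) → j ≤ G.toNat →
        (dp.getD j false = true ↔ Reach C (j : Int))) →
      (((PySem.List.pyRange a (G + 1) 1).foldl
          (fun dp j => if dp.getD (j - p).toNat false then dp.set j.toNat true else dp) dp).length
          = G.toNat + 1) ∧
      (∀ j : Nat, j ≤ G.toNat →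
        (((PySem.List.pyRange a (G + 1) 1).foldl
          (fun dp j => if dp.getD (j - p).toNat false then dp.set j.toNat true else dp) dp).getD j false = true
          ↔ ∃ t : Nat, Reach C ((j : Int) - t * p))) := by
  intro c
  induction c with
  | zero =>
      intro a ha hac dp hlen h1 h2
      rw [PySem.List.pyRange_one_eq_nil (by omega)]
      exact ⟨hlen, fun j hj => h1 j (by omega) hj⟩
  | succ c ihc =>
      intro a ha hac dp hlen h1 h2
      by_cases haG : a < G + 1
      · rw [PySem.List.pyRange_one_cons haG]
        simp only [List.foldl_cons]
        have ha0 : (0:Int) ≤ a := by omega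
        have haN : ((a.toNat : Int)) = a := Int.toNat_of_nonneg ha0
        have hapN : (((a - p).toNat : Int)) = a - p := Int.toNat_of_nonneg (by omega)
        -- the condition dp[j - p]
        have hcond : dp.getD (a - p).toNat false = true ↔ ∃ t : Nat, Reach C ((a - p) - t * p) := by
          have := h1 (a - p).toNat (by omega) (by omega)
          rwa [hapN] at this
        -- the one-step update keeps the invariant, with the boundary moved from a to a + 1
        have key : ∀ j : Nat, j ≤ G.toNat →
            ((if dp.getD (a - p).toNat false then dp.set a.toNat true else dp).getD j false = true
              ↔ if (j : Int) < a + 1 then (∃ t : Nat, Reach C ((j : Int) - t * p)) else Reach C (j : Int)) := by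
          intro j hj
          by_cases hja : j = a.toNat
          · subst hja
            by_cases hc : dp.getD (a - p).toNat false = true
            · rw [if_pos hc, if_pos (show ((a.toNat : Int)) < a + 1 by omega)]
              rw [List.getD_eq_getElem?_getD, List.getElem?_set_self (by omega)]
              simp only [Option.getD_some]
              obtain ⟨t, ht⟩ := hcond.1 hc
              refine iff_of_true trivial ⟨t + 1, ?_⟩
              have e : a - p - (t : Int) * p = (a.toNat : Int) - ((t + 1 : Nat) : Int) * p := by
                rw [haN]; push_cast; ring
              rw [e] at ht; exact ht
            · rw [if_neg hc, if_pos (show ((a.toNat : Int)) < a + 1 by omega)]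
              rw [h2 a.toNat (by omega) (by omega)]
              constructor
              · intro h; exact ⟨0, by simpa [haN] using h⟩
              · rintro ⟨t, ht⟩
                cases t with
                | zero => simpa using ht
                | succ t =>
                    exfalso; apply hc
                    refine hcond.2 ⟨t, ?_⟩
                    have e : (a.toNat : Int) - ((t + 1 : Nat) : Int) * p = a - p - (t : Int) * p := by
                      rw [haN]; push_cast; ring
                    rw [e] at ht; exact ht
          · have hne : a.toNat ≠ j := fun e => hja e.symm
            have hunch : (if dp.getD (a - p).toNat false then dp.set a.toNat true else dp).getD j false
                = dp.getD j false := by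
              split
              · simp [List.getD_eq_getElem?_getD, List.getElem?_set_ne hne]
              · rfl
            rw [hunch]
            by_cases hjlt : (j : Int) < a + 1
            · rw [if_pos hjlt]
              exact h1 j (by omega) hj
            · rw [if_neg hjlt]
              exact h2 j (by omega) hj
        have hlen2 : (if dp.getD (a - p).toNat false then dp.set a.toNat true else dp).length
            = G.toNat + 1 := by split <;> simp [hlen]
        refine ihc (a + 1) (by omega) (by omega)
          (if dp.getD (a - p).toNat false then dp.set a.toNat true else dp) hlen2 ?_ ?_
        · intro j hja hj
          have := key j hj
          rwa [if_pos hja] at this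
        · intro j hja hj
          have := key j hj
          rwa [if_neg (show ¬((j : Int) < a + 1) by omega)] at this
      · rw [PySem.List.pyRange_one_eq_nil (by omega)]
        exact ⟨hlen, fun j hj => h1 j (by omega) hj⟩

theorem dp_fold (G : Int) :
    ∀ (P C : List Int) (dp : List Bool), (∀ x ∈ C, 2 ≤ x) → (∀ x ∈ P, 2 ≤ x) →
      dp.length = G.toNat + 1 →
      (∀ j : Nat, j ≤ G.toNat → (dp.getD j false = true ↔ Reach C (j : Int))) →
      (∀ j : Nat, j ≤ G.toNat →
        ((P.foldl (fun dp p =>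
            (PySem.List.pyRange p (G + 1) 1).foldl
              (fun dp j => if dp.getD (j - p).toNat false then dp.set j.toNat true else dp) dp) dp).getD j false = true
          ↔ Reach (C ++ P) (j : Int))) := by
  intro P
  induction P with
  | nil =>
      intro C dp hC _ hlen hdp j hj
      simpa using hdp j hj
  | cons p ps ih =>
      intro C dp hC hP hlen hdp j hj
      simp only [List.foldl_cons]
      have hp : 2 ≤ p := hP p (by simp)
      have hC0 : ∀ x ∈ C, (0:Int) ≤ x := fun x hx => by have := hC x hx; omega
      have pass := dp_inner G p hp C (G + 1 - p).toNat p le_rfl (Int.self_le_toNat _) dp hlen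
        (fun j hja hj => by
          rw [hdp j hj]
          constructor
          · intro h; exact ⟨0, by simpa using h⟩
          · rintro ⟨t, ht⟩
            cases t with
            | zero => simpa using ht
            | succ t =>
                exfalso
                have hnn := reach_nonneg hC0 ht
                have : ((t + 1 : Nat) : Int) * p ≤ (j : Int) := by omega
                have hp1 : ((t + 1 : Nat) : Int) * p ≥ 1 * p := by
                  apply mul_le_mul_of_nonneg_right _ (by omega)
                  push_cast; omega
                omega)
        (fun j _ hj => hdp j hj)
      obtain ⟨hlen', hdp'⟩ := pass
      have hdp'' : ∀ j : Nat, j ≤ G.toNat →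
          (((PySem.List.pyRange p (G + 1) 1).foldl
            (fun dp j => if dp.getD (j - p).toNat false then dp.set j.toNat true else dp) dp).getD j false = true
            ↔ Reach (C ++ [p]) (j : Int)) := by
        intro j hj
        rw [hdp' j hj, reach_append_iff]
      have := ih (C ++ [p]) _ (by
          intro x hx
          rcases List.mem_append.1 hx with hx | hx
          · exact hC x hx
          · simp at hx; omega)
        (fun x hx => hP x (by simp [hx])) hlen' hdp'' j hj
      have e : (C ++ [p]) ++ ps = C ++ p :: ps := by simp
      rwa [e] at this

theorem altDP_spec (G : Int) (hG : 0 ≤ G) (P : List Int) (hP : ∀ x ∈ P, 2 ≤ x)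
    (j : Nat) (hj : j ≤ G.toNat) :
    ((altDP G P).getD j false = true ↔ Reach P (j : Int)) := by
  unfold altDP
  have init : ∀ j : Nat, j ≤ G.toNat →
      ((true :: List.replicate G.toNat false).getD j false = true ↔ Reach ([] : List Int) (j : Int)) := by
    intro j _
    cases j with
    | zero => simp [reach_nil]
    | succ j =>
        simp only [List.getD_cons_succ]
        rw [reach_nil]
        have : (List.replicate G.toNat false).getD j false = false := by
          simp [List.getD_eq_getElem?_getD, List.getElem?_replicate]
          split <;> simp
        rw [this]
        simp
        omega
  have := dp_fold G P [] (true :: List.replicate G.toNat false) (by simp) hP (by simp) init j hj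
  simpa using this

-- ---- the trial-division fold ----
def pfInv (n0 : Int) (st : Int × List Int) : Prop :=
  0 < st.1 ∧ st.1 ≤ n0 ∧ (st.1 = n0 ↔ st.2 = []) ∧ (∀ x ∈ st.2, 2 ≤ x)

theorem pvDivideOut_pos {i : Int} (hi : 2 ≤ i) :
    ∀ (f : Nat) (m : Int), 0 < m → 0 < pvDivideOut i f m := by
  intro f
  induction f with
  | zero => intro m hm; simpa [pvDivideOut] using hm
  | succ f ihf =>
      intro m hm
      rw [pvDivideOut]
      split
      · next hmod =>
          apply ihf
          have hdvd : i ∣ m := (PySem.Int.mod_eq_zero_iff_dvd m i).1 hmod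
          have him : i ≤ m := Int.le_of_dvd hm hdvd
          rw [PySem.Int.floordiv_eq_ediv_of_pos (by omega)]
          have : (1:Int) ≤ m / i := by
            rw [Int.le_ediv_iff_mul_le (by omega)]; omega
          omega
      · exact hm

theorem pvDivideOut_le {i : Int} (hi : 2 ≤ i) :
    ∀ (f : Nat) (m : Int), 0 < m → pvDivideOut i f m ≤ m := by
  intro f
  induction f with
  | zero => intro m _; simp [pvDivideOut]
  | succ f ihf =>
      intro m hm
      rw [pvDivideOut]
      split
      · next hmod =>
          have hdvd : i ∣ m := (PySem.Int.mod_eq_zero_iff_dvd m i).1 hmod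
          have him : i ≤ m := Int.le_of_dvd hm hdvd
          rw [PySem.Int.floordiv_eq_ediv_of_pos (by omega)]
          have h1 : (1:Int) ≤ m / i := by
            rw [Int.le_ediv_iff_mul_le (by omega)]; omega
          have h2 : m / i ≤ m := Int.ediv_le_self i (by omega)
          have := ihf (m / i) (by omega)
          omega
      · exact le_rfl

-- one division pass strictly shrinks a positive m it divides
theorem pvDivideOut_lt {i m : Int} (hi : 2 ≤ i) (hm : 0 < m)
    (hmod : PySem.Int.mod m i = 0) : pvDivideOut i m.toNat m < m := by
  have hdvd : i ∣ m := (PySem.Int.mod_eq_zero_iff_dvd m i).1 hmod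
  have him : i ≤ m := Int.le_of_dvd hm hdvd
  obtain ⟨f, hf⟩ : ∃ f : Nat, m.toNat = f + 1 := ⟨m.toNat - 1, by omega⟩
  rw [hf, pvDivideOut, if_pos hmod,
    PySem.Int.floordiv_eq_ediv_of_pos (show (0:Int) < i by omega)]
  have hq1 : (1:Int) ≤ m / i := by rw [Int.le_ediv_iff_mul_le (by omega)]; omega
  have hqm : m / i < m := by
    apply Int.ediv_lt_of_lt_mul (by omega)
    nlinarith
  have := pvDivideOut_le hi f (m / i) (by omega)
  omega

theorem factor_fold_inv (n0 : Int) (l : List Int) (hl : ∀ i ∈ l, 2 ≤ i) :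
    ∀ st : Int × List Int, pfInv n0 st → pfInv n0 (l.foldl pvFactorStep st) := by
  induction l with
  | nil => intro st h; exact h
  | cons i is ih =>
      intro st h
      have hi : 2 ≤ i := hl i (by simp)
      have his : ∀ x ∈ is, 2 ≤ x := fun x hx => hl x (by simp [hx])
      simp only [List.foldl_cons]
      apply ih his
      obtain ⟨hpos, hle, hiff, hall⟩ := h
      unfold pvFactorStep
      split
      · next hmod =>
          have hlt : pvDivideOut i st.1.toNat st.1 < st.1 := pvDivideOut_lt hi hpos hmod
          have hpos' : 0 < pvDivideOut i st.1.toNat st.1 := pvDivideOut_pos hi _ _ hpos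
          refine ⟨hpos', by omega, ?_, ?_⟩
          · constructor
            · intro he; omega
            · intro he; simp at he
          · intro x hx
            rcases List.mem_append.1 hx with hx | hx
            · exact hall x hx
            · simp at hx; omega
      · exact ⟨hpos, hle, hiff, hall⟩

-- checkSum is false on negative goals (coins are ≥ 2 there)
theorem checkSum_neg (P : List Int) (hP : ∀ p ∈ P, 2 ≤ p) (g : Int) (hg : g < 0) :
    checkSum P g = false := by
  rw [Bool.eq_false_iff, Ne, checkSum_iff P g hP]
  intro h
  have := reach_nonneg (fun p hp => by have := hP p hp; omega) h
  omega

-- A's tail (empty-list test + two check_sums) equals B's tail (early bounds test + DP lookups)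
theorem tails_eq (n k : Int) (P : List Int) (hP : ∀ x ∈ P, 2 ≤ x)
    (hk0 : k ≠ 0) (hkn : k ≠ n) :
    (if P = [] then false else checkSum P k && checkSum P (n - k)) =
    (if k < 0 ∨ n < k then false else
      (altDP (max k (n - k)) P).getD k.toNat false &&
      (altDP (max k (n - k)) P).getD (n - k).toNat false) := by
  by_cases hbad : k < 0 ∨ n < k
  · rw [if_pos hbad]
    by_cases hP0 : P = []
    · rw [if_pos hP0]
    · rw [if_neg hP0]
      rcases hbad with hbad | hbad
      · rw [checkSum_neg P hP k (by omega)]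
        simp
      · rw [checkSum_neg P hP (n - k) (by omega)]
        simp
  · rw [if_neg hbad]
    have hk : 0 < k := by omega
    have hkn' : k < n := by omega
    have hr : 0 < n - k := by omega
    set G := max k (n - k)
    have hG0 : 0 ≤ G := by omega
    have hGk : ((k.toNat : Int)) = k := Int.toNat_of_nonneg (by omega)
    have hGr : (((n - k).toNat : Int)) = n - k := Int.toNat_of_nonneg (by omega)
    have hjk : k.toNat ≤ G.toNat := by omega
    have hjr : (n - k).toNat ≤ G.toNat := by omega
    by_cases hP0 : P = []
    · subst hP0
      rw [if_pos rfl]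
      have := altDP_spec G hG0 [] (by simp) k.toNat hjk
      rw [hGk, reach_nil] at this
      have hfalse : (altDP G []).getD k.toNat false = false := by
        rw [Bool.eq_false_iff, Ne, this]; omega
      rw [hfalse]
      simp
    · rw [if_neg hP0]
      have e1 : checkSum P k = (altDP G P).getD k.toNat false := by
        rw [Bool.eq_iff_iff, checkSum_iff P k hP, altDP_spec G hG0 P hP k.toNat hjk, hGk]
      have e2 : checkSum P (n - k) = (altDP G P).getD (n - k).toNat false := by
        rw [Bool.eq_iff_iff, checkSum_iff P (n - k) hP, altDP_spec G hG0 P hP (n - k).toNat hjr, hGr]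
      rw [e1, e2]

theorem centrifuge_eq_alt (n k : Int) (hpre : Pre_centrifuge n k) :
    centrifuge n k = centrifuge_alt n k := by
  unfold centrifuge centrifuge_alt
  by_cases htriv : k = 0 ∨ n = k
  · rw [if_pos htriv, if_pos (by tauto)]
  · rw [if_neg htriv, if_neg (show ¬ (k = 0 ∨ k = n) by tauto)]
    simp only []
    have hk0 : k ≠ 0 := by tauto
    have hkn : k ≠ n := fun e => htriv (Or.inr e.symm)
    have hn0 : 0 ≤ n := by
      rcases hpre with h | h | h
      · exact absurd (Or.inl h) htriv
      · exact absurd h hkn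
      · exact h
    by_cases hn : n = 0
    · subst hn
      rw [PySem.List.pyRange_one_eq_nil (by decide)]
      simp only [List.foldl_nil]
      rw [if_neg (show ¬ ((0:Int) ≠ 1 ∧ (0:Int) ≠ 0 - k + k) by
            intro h; exact h.2 (by ring)),
          if_pos rfl, if_pos (show k < 0 ∨ (0:Int) < k by omega)]
    · have hn1 : 0 < n := by omega
      set st := (PySem.List.pyRange 2 ((n.toNat.sqrt : Int) + 1) 1).foldl pvFactorStep (n, [])
        with hst
      have hinv : pfInv n st :=
        factor_fold_inv n _ (fun i hi => (PySem.List.mem_pyRange_one.1 hi).1) (n, [])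
          ⟨hn1, le_rfl, by simp, by simp⟩
      obtain ⟨hm0, hmle, hmiff, hcoins⟩ := hinv
      have hrk : n - k + k = n := by ring
      by_cases hcase : st.1 = n
      · -- no division happened: A's list is empty (leftover not appended), A returns False;
        -- B's list is [n] and 0 < k < n is not a multiple of n, so B returns False too
        have hnil : st.2 = [] := hmiff.1 hcase
        have hA : ¬ (st.1 ≠ 1 ∧ st.1 ≠ n - k + k) := by
          intro ⟨_, h2⟩; rw [hrk] at h2; exact h2 hcase
        rw [if_neg hA, hnil, if_pos rfl]
        simp only [List.nil_append]
        by_cases hbad : k < 0 ∨ n < k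
        · rw [if_pos hbad]
        · rw [if_neg hbad]
          have hk : 0 < k := by omega
          have hkn' : k < n := by omega
          have hn2 : 2 ≤ n := by omega
          have h1n : 1 < st.1 := by omega
          rw [if_pos h1n]
          set G := max k (n - k)
          have hG0 : 0 ≤ G := by omega
          have hGk : ((k.toNat : Int)) = k := Int.toNat_of_nonneg (by omega)
          have spec := altDP_spec G hG0 [st.1] (by intro x hx; simp at hx; omega) k.toNat (by omega)
          rw [hGk, reach_singleton] at spec
          have hfalse : (altDP G [st.1]).getD k.toNat false = false := by
            rw [Bool.eq_false_iff, Ne, spec]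
            rintro ⟨t, ht⟩
            rcases Nat.eq_zero_or_pos t with rfl | htpos
            · simp at ht; omega
            · have : (1:Int) * st.1 ≤ (t:Int) * st.1 := by
                apply mul_le_mul_of_nonneg_right _ (by omega)
                exact_mod_cast htpos
              rw [hcase] at *
              omega
          rw [hfalse]
          simp
      · -- some division happened: both sides use the same non-empty coin list
        have hne : st.2 ≠ [] := fun e => hcase (hmiff.2 e)
        by_cases hm1 : st.1 = 1
        · have hA : ¬ (st.1 ≠ 1 ∧ st.1 ≠ n - k + k) := by intro ⟨h1, _⟩; exact h1 hm1
          rw [if_neg hA, if_neg (by omega : ¬ (1 < st.1))]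
          exact tails_eq n k st.2 hcoins hk0 hkn
        · have h2m : 2 ≤ st.1 := by omega
          have hA : st.1 ≠ 1 ∧ st.1 ≠ n - k + k := ⟨by omega, by rw [hrk]; exact hcase⟩
          rw [if_pos hA, if_pos (by omega : 1 < st.1)]
          have hcoins' : ∀ x ∈ st.2 ++ [st.1], 2 ≤ x := by
            intro x hx
            rcases List.mem_append.1 hx with hx | hx
            · exact hcoins x hx
            · simp at hx; omega
          have := tails_eq n k (st.2 ++ [st.1]) hcoins' hk0 hkn
          simpa using this

-- ===== VERDICT (by name: the statement is the Claim_ definition above) =====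
theorem centrifuge_spec : Claim_equal_centrifuge := by
  intro n k _ hpre
  unfold Spec_centrifuge
  exact centrifuge_eq_alt n k hpre
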